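-- pv_equiv track=rewrite | github.com/NUS-SNL/p4-traffictool | src/GenTrafficScapy.py | rectify_paths
-- ===== SOURCE A (Python) =====
-- multi_headers = []
--
-- def rectify_paths(paths):
--     '''rectifies header names which are of array form'''
--     for path_id in range(len(paths)):
--         path = paths[path_id]
--         distinct_state = set(path)
--         multi_headers_loc = list(set(multi_headers))
--         for i in distinct_state:
--             if i in multi_headers_loc:
--                 count = 0
--                 for j in range(len(path)):
--                     if (path[j] == i):
--                         path[j] = path[j]+"_"+str(count)
--                         count += 1
--         paths[path_id] = path
--     paths.sort(key=len)
--     return paths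
-- ===== SOURCE B (Python) =====
-- multi_headers = []
--
-- def rectify_paths(paths):
--     '''rectifies header names which are of array form'''
--     # multi_headers is the empty module-level list, so no header is ever of
--     # "array form" here: the observable effect is a stable sort of the paths
--     # by length.  Do it as a counting sort: one bucket pass per length
--     # 0..longest, in place (like the original, which sorts the caller's list).
--     longest = max(map(len, paths), default=-1)
--     out = []
--     for target in range(longest + 1):
--         out.extend(p for p in paths if len(p) == target)
--     paths[:] = out
--     return paths
-- ===== Notes on version B (the rewrite author's own statement) =====
-- stated objective: alternative
-- what changed: Since module-level multi_headers is empty, A's per-path renaming scans are dead code and A's value is a stable sort by length; B drops the dead scans and replaces the comparison sort by a counting sort that concatenates the length-L bucket for each L from 0 to the longest path.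
import Mathlib
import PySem

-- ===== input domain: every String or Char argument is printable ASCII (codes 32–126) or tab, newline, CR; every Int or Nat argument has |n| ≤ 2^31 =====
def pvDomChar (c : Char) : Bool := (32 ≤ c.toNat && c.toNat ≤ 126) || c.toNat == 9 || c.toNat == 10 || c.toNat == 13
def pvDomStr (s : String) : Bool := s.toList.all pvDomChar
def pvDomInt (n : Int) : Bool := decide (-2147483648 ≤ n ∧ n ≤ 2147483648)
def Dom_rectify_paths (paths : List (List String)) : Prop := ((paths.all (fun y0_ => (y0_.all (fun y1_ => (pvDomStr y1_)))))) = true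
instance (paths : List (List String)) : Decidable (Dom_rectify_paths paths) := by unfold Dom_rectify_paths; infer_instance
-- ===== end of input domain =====

-- B replaces A's dead per-path renaming scans (multi_headers is the empty module constant)
-- and its comparison sort by a single counting sort by length; both Pythons mutate the
-- caller's list in place, and the equivalence proved here is about the RETURN value.

-- ===== PORT A =====
def multi_headers : List String := []

def rectify_paths (paths : List (List String)) : List (List String) :=
  -- for path_id in range(len(paths)): …
  let paths := (PySem.List.pyRange 0 (PySem.List.len paths) 1).foldl (fun paths path_id =>
    let path := PySem.List.pyGetD paths path_id []          -- path = paths[path_id]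
    let distinct_state := PySem.Set.ofList path             -- set(path)
    let multi_headers_loc := PySem.Set.ofList multi_headers -- list(set(multi_headers))
    -- for i in distinct_state: …  (body is order-independent: it never fires, multi_headers_loc = [])
    let path := distinct_state.foldl (fun path i =>
      if PySem.Set.contains multi_headers_loc i then
        -- count = 0; for j in range(len(path)): if path[j] == i: path[j] = path[j]+"_"+str(count); count += 1
        ((PySem.List.pyRange 0 (PySem.List.len path) 1).foldl (fun (st : List String × Int) j =>
          if PySem.List.pyGetD st.1 j "" == i then
            (PySem.List.pySetD st.1 j (PySem.List.pyGetD st.1 j "" ++ "_" ++ PySem.Int.toStr st.2), st.2 + 1)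
          else st) (path, (0 : Int))).1
      else path) path
    PySem.List.pySetD paths path_id path) paths             -- paths[path_id] = path
  PySem.List.sorted paths (fun p => PySem.List.len p) false -- paths.sort(key=len)

-- ===== PORT B =====
def rectify_paths_alt (paths : List (List String)) : List (List String) :=
  -- longest = max(map(len, paths), default=-1)
  let longest := PySem.List.maxD (paths.map (fun p => PySem.List.len p)) (fun x => x) (-1)
  -- out = []; for target in range(longest + 1): out.extend(p for p in paths if len(p) == target)
  (PySem.List.pyRange 0 (longest + 1) 1).foldl
    (fun out target => out ++ paths.filter (fun p => PySem.List.len p == target)) []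
  -- paths[:] = out; return paths  — the return value is out

-- ===== PRECONDITION & SPEC =====
def Spec_rectify_paths (paths : List (List String)) (out : List (List String)) : Prop := out = rectify_paths_alt paths
instance (paths : List (List String)) (out : List (List String)) : Decidable (Spec_rectify_paths paths out) := by unfold Spec_rectify_paths; infer_instance

-- ===== CLAIM (what is proved, stated in full; the proofs are below) =====
def Claim_equal_rectify_paths : Prop := ∀ (paths : List (List String)), Dom_rectify_paths paths → Spec_rectify_paths paths (rectify_paths paths)

-- ===== LEMMAS AND PROOFS =====

-- A's renaming body never fires: membership in the empty multi_headers_loc is false.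
lemma inner_fold_id (s : List String) (path : List String) :
    s.foldl (fun path i =>
      if PySem.Set.contains (PySem.Set.ofList multi_headers) i then
        ((PySem.List.pyRange 0 (PySem.List.len path) 1).foldl (fun (st : List String × Int) j =>
          if PySem.List.pyGetD st.1 j "" == i then
            (PySem.List.pySetD st.1 j (PySem.List.pyGetD st.1 j "" ++ "_" ++ PySem.Int.toStr st.2), st.2 + 1)
          else st) (path, (0 : Int))).1
      else path) path = path := by
  induction s generalizing path with
  | nil => rfl
  | cons a s ih =>
    have hc : PySem.Set.contains (PySem.Set.ofList multi_headers) a = false := rfl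
    simp only [List.foldl_cons, hc, Bool.false_eq_true, if_false]
    exact ih path

-- A's whole index loop leaves paths unchanged.
lemma outer_fold_id (l : List Int) (xs : List (List String))
    (h : ∀ i ∈ l, 0 ≤ i ∧ i < (xs.length : Int)) :
    l.foldl (fun paths path_id =>
      let path := PySem.List.pyGetD paths path_id []
      let path := (PySem.Set.ofList path).foldl (fun path i =>
        if PySem.Set.contains (PySem.Set.ofList multi_headers) i then
          ((PySem.List.pyRange 0 (PySem.List.len path) 1).foldl (fun (st : List String × Int) j =>
            if PySem.List.pyGetD st.1 j "" == i then
              (PySem.List.pySetD st.1 j (PySem.List.pyGetD st.1 j "" ++ "_" ++ PySem.Int.toStr st.2), st.2 + 1)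
            else st) (path, (0 : Int))).1
        else path) path
      PySem.List.pySetD paths path_id path) xs = xs := by
  induction l with
  | nil => rfl
  | cons i l ih =>
    have hi := h i (by simp)
    simp only [List.foldl_cons]
    rw [inner_fold_id]
    rw [PySem.List.pySetD_of_nonneg _ _ hi.1,
        PySem.List.pyGetD_eq_getElem _ _ hi.1 hi.2, List.set_getElem_self]
    exact ih (fun j hj => h j (by simp [hj]))

-- A's return value is the stable sort of paths by length.
lemma rectify_paths_eq_sorted (paths : List (List String)) :
    rectify_paths paths = PySem.List.sorted paths (fun p => PySem.List.len p) false := by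
  unfold rectify_paths
  rw [outer_fold_id]
  intro i hi
  rw [PySem.List.mem_pyRange_one] at hi
  rw [PySem.List.len_eq] at hi
  exact ⟨hi.1, hi.2⟩

-- Stable insertion into a split list: past everything not "before", in front of everything "before".
lemma insertBy_split {α : Type} (before : α → α → Bool) (x : α) (l1 l2 : List α)
    (h1 : ∀ y ∈ l1, before x y = false) (h2 : ∀ y ∈ l2, before x y = true) :
    PySem.List.insertBy before x (l1 ++ l2) = l1 ++ x :: l2 := by
  induction l1 with
  | nil =>
    cases l2 with
    | nil => rfl
    | cons y t => simp [PySem.List.insertBy, h2 y (by simp)]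
  | cons a l1 ih =>
    simp only [List.cons_append, PySem.List.insertBy, h1 a (by simp), Bool.false_eq_true, if_false]
    exact congrArg (a :: ·) (ih (fun y hy => h1 y (by simp [hy])))

lemma flatMap_congr_mem {α β : Type} (l : List α) (f g : α → List β)
    (h : ∀ a ∈ l, f a = g a) : l.flatMap f = l.flatMap g := by
  induction l with
  | nil => rfl
  | cons a l ih =>
    simp only [List.flatMap_cons, h a (by simp)]
    rw [ih (fun b hb => h b (by simp [hb]))]

-- Counting sort: concatenating the length-L buckets for L = 0,…,B-1 IS the stable sort by length.
lemma sorted_eq_buckets (xs : List (List String)) (B : Int)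
    (h : ∀ p ∈ xs, PySem.List.len p < B) :
    PySem.List.sorted xs (fun p => PySem.List.len p) false
      = (PySem.List.pyRange 0 B 1).flatMap (fun L => xs.filter (fun p => PySem.List.len p == L)) := by
  simp only [PySem.List.len_eq] at h ⊢
  induction xs using List.reverseRecOn with
  | nil =>
    rw [(PySem.List.sorted_eq_nil_iff [] _ false).mpr rfl]
    simp
  | append_singleton xs x ih =>
    have hx : ((x.length : Int)) < B := by simpa using h x (by simp)
    have hx0 : (0 : Int) ≤ (x.length : Int) := by positivity
    have hih := ih (fun p hp => h p (by simp [hp]))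
    -- LHS: the stable sort of xs ++ [x] inserts x into the sorted xs
    have hL1 : PySem.List.sorted (xs ++ [x]) (fun p => ((p.length : Int))) false
        = PySem.List.insertBy (fun a b => decide (((a.length : Int)) < ((b.length : Int)))) x
            (PySem.List.sorted xs (fun p => ((p.length : Int))) false) := by
      rw [PySem.List.sorted_eq_foldl_insertBy, List.foldl_append, List.foldl_cons, List.foldl_nil,
          ← PySem.List.sorted_eq_foldl_insertBy]
    -- split the range of lengths at the length of x
    have hsplit : (PySem.List.pyRange 0 B 1) = PySem.List.pyRange 0 ((x.length : Int)) 1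
        ++ [((x.length : Int))] ++ PySem.List.pyRange ((x.length : Int) + 1) B 1 := by
      rw [PySem.List.pyRange_one_append 0 ((x.length : Int) + 1) B (by omega) (by omega),
          PySem.List.pyRange_one_succ_right hx0]
    rw [hL1, hih, hsplit, List.flatMap_append, List.flatMap_append, List.flatMap_append,
        List.flatMap_append]
    rw [insertBy_split _ x _ _ ?lo ?hi]
    case lo =>
      intro y hy
      simp only [decide_eq_false_iff_not, not_lt]
      rcases List.mem_append.mp hy with hy | hy
      · rcases List.mem_flatMap.mp hy with ⟨L, hL, hyf⟩
        have hL' := PySem.List.mem_pyRange_one.mp hL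
        have hfil := (List.mem_filter.mp hyf).2
        simp only [beq_iff_eq] at hfil
        omega
      · simp only [List.flatMap_cons, List.flatMap_nil, List.append_nil] at hy
        have hfil := (List.mem_filter.mp hy).2
        simp only [beq_iff_eq] at hfil
        omega
    case hi =>
      intro y hy
      simp only [decide_eq_true_eq]
      rcases List.mem_flatMap.mp hy with ⟨L, hL, hyf⟩
      have hL' := PySem.List.mem_pyRange_one.mp hL
      have hfil := (List.mem_filter.mp hyf).2
      simp only [beq_iff_eq] at hfil
      omega
    -- now compare the three bucket groups
    have hb1 : (PySem.List.pyRange 0 ((x.length : Int)) 1).flatMap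
          (fun L => (xs ++ [x]).filter (fun p => ((p.length : Int)) == L))
        = (PySem.List.pyRange 0 ((x.length : Int)) 1).flatMap
          (fun L => xs.filter (fun p => ((p.length : Int)) == L)) := by
      apply flatMap_congr_mem
      intro L hL
      have hL' := PySem.List.mem_pyRange_one.mp hL
      rw [List.filter_append]
      simp only [List.filter_cons, List.filter_nil, beq_iff_eq]
      rw [if_neg (by omega), List.append_nil]
    have hb2 : (PySem.List.pyRange ((x.length : Int) + 1) B 1).flatMap
          (fun L => (xs ++ [x]).filter (fun p => ((p.length : Int)) == L))
        = (PySem.List.pyRange ((x.length : Int) + 1) B 1).flatMap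
          (fun L => xs.filter (fun p => ((p.length : Int)) == L)) := by
      apply flatMap_congr_mem
      intro L hL
      have hL' := PySem.List.mem_pyRange_one.mp hL
      rw [List.filter_append]
      simp only [List.filter_cons, List.filter_nil, beq_iff_eq]
      rw [if_neg (by omega), List.append_nil]
    have hbx : ([((x.length : Int))] : List Int).flatMap
          (fun L => (xs ++ [x]).filter (fun p => ((p.length : Int)) == L))
        = xs.filter (fun p => ((p.length : Int)) == ((x.length : Int))) ++ [x] := by
      simp [List.filter_append]
    rw [hb1, hb2, hbx]
    simp [List.append_assoc]

-- A foldl that can never produce none.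
lemma foldl_ne_none {β : Type} (f : Option β → β → Option β)
    (hf : ∀ acc x, f acc x ≠ none) (l : List β) :
    ∀ (init : Option β), l ≠ [] → l.foldl f init ≠ none := by
  induction l with
  | nil => intro init hl; exact absurd rfl hl
  | cons c l ih =>
    intro init _
    cases l with
    | nil => simpa using hf init c
    | cons d l2 =>
      simp only [List.foldl_cons]
      exact ih (f init c) (by simp)

-- max(map(len, paths), default=-1) bounds every length.
lemma len_lt_maxD_succ (paths : List (List String)) :
    ∀ p ∈ paths, PySem.List.len p
      < PySem.List.maxD (paths.map (fun p => PySem.List.len p)) (fun x => x) (-1) + 1 := by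
  intro p hp
  unfold PySem.List.maxD
  cases hm : PySem.List.max? (paths.map (fun q => PySem.List.len q)) (fun x => x) with
  | none =>
    exfalso
    unfold PySem.List.max? at hm
    refine foldl_ne_none _ ?_ _ none ?_ hm
    · intro acc x hax
      cases acc with
      | none => simp at hax
      | some m =>
        simp only [] at hax
        split at hax <;> simp at hax
    · simp only [ne_eq, List.map_eq_nil_iff]
      rintro rfl
      simp at hp
  | some m =>
    have := PySem.List.max?_isMax hm (PySem.List.len p) (List.mem_map_of_mem hp)
    simp only [Option.getD_some]
    omega

-- ===== VERDICT (by name: the statement is the Claim_ definition above) =====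
theorem rectify_paths_spec : Claim_equal_rectify_paths := by
  intro paths _
  unfold Spec_rectify_paths rectify_paths_alt
  rw [rectify_paths_eq_sorted, PySem.List.foldl_append_eq_flatMap, List.nil_append]
  exact sorted_eq_buckets paths _ (len_lt_maxD_succ paths)
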